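-- pv_equiv track=rewrite | github.com/eratovaitsi/head-thumbs | thombo_parser.py | split_into_blocks
-- ===== SOURCE A (Python) =====
-- def split_into_blocks(rows, gap_threshold=250):
--
--     if not rows:
--         return []
--
--     rows_sorted = sorted(rows, key=lambda r: r["y_mid"])
--
--     blocks = []
--     current = [rows_sorted[0]]
--
--     for prev, curr in zip(rows_sorted, rows_sorted[1:]):
--         if abs(curr["y_mid"] - prev["y_mid"]) > gap_threshold:
--             blocks.append(current)
--             current = []
--
--         current.append(curr)
--
--     blocks.append(current)
--     return blocks
-- ===== SOURCE B (Python) =====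
-- def split_into_blocks(rows, gap_threshold=250):
--     # Recursive span decomposition: peel off one maximal gap-bounded span at a
--     # time from the sorted list, instead of A's single scan that accumulates a
--     # current block and flushes it on each gap.
--     if not rows:
--         return []
--     rows_sorted = sorted(rows, key=lambda r: r["y_mid"])
--     blocks = []
--     rest = rows_sorted
--     while rest:
--         block, rest = _grab_span(rest[0], rest[1:], gap_threshold)
--         blocks.append(block)
--     return blocks
--
--
-- def _grab_span(first, rest, gap_threshold):
--     # Longest prefix of [first] + rest whose consecutive y_mid gaps are all
--     # within gap_threshold, plus the leftover suffix.
--     block = [first]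
--     k = 0
--     while k < len(rest) and abs(rest[k]["y_mid"] - block[-1]["y_mid"]) <= gap_threshold:
--         block.append(rest[k])
--         k += 1
--     return block, rest[k:]
-- ===== Notes on version B (the rewrite author's own statement) =====
-- stated objective: alternative
-- what changed: Replaces A's single accumulate-and-flush scan (carrying a current block and appending it whenever a gap appears) with a span decomposition that repeatedly peels the maximal gap-bounded prefix off the sorted list.
import Mathlib
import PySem

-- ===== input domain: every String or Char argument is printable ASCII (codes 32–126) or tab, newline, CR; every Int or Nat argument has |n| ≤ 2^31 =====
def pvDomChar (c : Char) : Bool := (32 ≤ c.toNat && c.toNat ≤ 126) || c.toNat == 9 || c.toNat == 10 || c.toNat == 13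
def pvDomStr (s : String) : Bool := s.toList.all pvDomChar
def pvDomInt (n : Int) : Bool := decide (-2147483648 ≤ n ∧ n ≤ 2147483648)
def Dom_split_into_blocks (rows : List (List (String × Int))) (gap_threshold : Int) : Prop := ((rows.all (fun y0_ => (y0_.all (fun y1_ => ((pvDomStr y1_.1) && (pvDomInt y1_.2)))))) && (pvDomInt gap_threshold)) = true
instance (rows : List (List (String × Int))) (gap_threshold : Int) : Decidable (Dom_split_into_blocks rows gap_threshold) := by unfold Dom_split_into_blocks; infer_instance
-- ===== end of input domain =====

-- B replaces A's accumulate-and-flush scan with a repeated maximal-span peel off the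
-- sorted list (alternative decomposition, same cost); no argument is mutated.

-- r["y_mid"] : first match in the association list (total via getD 0; Pre_ guarantees presence)
def pvY (r : List (String × Int)) : Int :=
  ((r.find? (fun p => p.1 == "y_mid")).map (fun p => p.2)).getD 0

-- ===== PORT A =====
def split_into_blocks (rows : List (List (String × Int))) (gap_threshold : Int) : List (List (List (String × Int))) :=
  if rows = [] then []
  else
    let rows_sorted := PySem.List.sorted rows (fun r => pvY r) false
    match rows_sorted with
    | [] => []  -- unreachable: rows ≠ []
    | r0 :: _ =>
      let st := (List.zip rows_sorted (rows_sorted.drop 1)).foldl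
        (fun (st : List (List (List (String × Int))) × List (List (String × Int))) pc =>
          if |pvY pc.2 - pvY pc.1| > gap_threshold then (st.1 ++ [st.2], [] ++ [pc.2])
          else (st.1, st.2 ++ [pc.2]))
        ([], [r0])
      st.1 ++ [st.2]

-- ===== PORT B =====
-- _grab_span: longest gap-bounded prefix plus leftover suffix
def pvGrab (g : Int) (first : List (String × Int)) (rest : List (List (String × Int))) :
    List (List (String × Int)) × List (List (String × Int)) :=
  match rest with
  | [] => ([first], [])
  | r :: rs =>
    if |pvY r - pvY first| ≤ g then
      let p := pvGrab g r rs
      (first :: p.1, p.2)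
    else ([first], r :: rs)

theorem pvGrab_snd_len (g : Int) (first : List (String × Int)) (rest : List (List (String × Int))) :
    (pvGrab g first rest).2.length ≤ rest.length := by
  induction rest generalizing first with
  | nil => simp [pvGrab]
  | cons r rs ih =>
    simp only [pvGrab]
    split
    · exact le_trans (ih r) (Nat.le_succ _)
    · simp

-- the while-loop over the remaining suffix
def pvBlocksLoop (g : Int) (rest : List (List (String × Int))) : List (List (List (String × Int))) :=
  match rest with
  | [] => []
  | r :: rs =>
    let p := pvGrab g r rs
    p.1 :: pvBlocksLoop g p.2
termination_by rest.length
decreasing_by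
  simpa using Nat.lt_succ_of_le (pvGrab_snd_len g r rs)

def split_into_blocks_alt (rows : List (List (String × Int))) (gap_threshold : Int) : List (List (List (String × Int))) :=
  if rows = [] then []
  else pvBlocksLoop gap_threshold (PySem.List.sorted rows (fun r => pvY r) false)

-- ===== PRECONDITION & SPEC =====
-- Pre_: every row actually has the key "y_mid" (otherwise Python A raises KeyError during the sort)
def Pre_split_into_blocks (rows : List (List (String × Int))) (_gap_threshold : Int) : Prop :=
  ∀ r ∈ rows, (r.find? (fun p => p.1 == "y_mid")).isSome
instance (rows : List (List (String × Int))) (gap_threshold : Int) : Decidable (Pre_split_into_blocks rows gap_threshold) := by unfold Pre_split_into_blocks; infer_instance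
def pvWitness_split_into_blocks : (List (List (String × Int))) × Int :=
  ([[("y_mid", 10)], [("y_mid", 400), ("w", 3)], [("y_mid", 15)]], 250)

def Spec_split_into_blocks (rows : List (List (String × Int))) (gap_threshold : Int) (out : List (List (List (String × Int)))) : Prop := out = split_into_blocks_alt rows gap_threshold
instance (rows : List (List (String × Int))) (gap_threshold : Int) (out : List (List (List (String × Int)))) : Decidable (Spec_split_into_blocks rows gap_threshold out) := by unfold Spec_split_into_blocks; infer_instance

-- ===== CLAIM (what is proved, stated in full; the proofs are below) =====
def Claim_equal_split_into_blocks : Prop := ∀ (rows : List (List (String × Int))) (gap_threshold : Int), Dom_split_into_blocks rows gap_threshold → Pre_split_into_blocks rows gap_threshold → Spec_split_into_blocks rows gap_threshold (split_into_blocks rows gap_threshold)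

-- ===== LEMMAS AND PROOFS =====

theorem pvBlocksLoop_cons (g : Int) (r : List (String × Int)) (rs : List (List (String × Int))) :
    pvBlocksLoop g (r :: rs) = (pvGrab g r rs).1 :: pvBlocksLoop g (pvGrab g r rs).2 := by
  rw [pvBlocksLoop]

theorem pvFold_grab (g : Int) (rest : List (List (String × Int))) :
    ∀ (prev : List (String × Int)) (blocks : List (List (List (String × Int))))
      (cur : List (List (String × Int))),
    (let st := (List.zip (prev :: rest) rest).foldl
        (fun (st : List (List (List (String × Int))) × List (List (String × Int))) pc =>
          if |pvY pc.2 - pvY pc.1| > g then (st.1 ++ [st.2], [] ++ [pc.2])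
          else (st.1, st.2 ++ [pc.2]))
        (blocks, cur ++ [prev]);
      st.1 ++ [st.2])
    = blocks ++ ((cur ++ (pvGrab g prev rest).1) :: pvBlocksLoop g (pvGrab g prev rest).2) := by
  induction rest with
  | nil => intro prev blocks cur; simp [pvGrab, pvBlocksLoop]
  | cons r rs ih =>
    intro prev blocks cur
    simp only [List.zip_cons_cons, List.foldl_cons]
    by_cases h : |pvY r - pvY prev| ≤ g
    · have hng : ¬ (|pvY r - pvY prev| > g) := not_lt.mpr h
      simp only [hng, if_false]
      have := ih r blocks (cur ++ [prev])
      simp only [List.nil_append] at this ⊢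
      rw [this]
      simp [pvGrab, h, List.append_assoc]
    · have hg : |pvY r - pvY prev| > g := lt_of_not_ge h
      simp only [hg, if_true]
      have := ih r (blocks ++ [cur ++ [prev]]) []
      simp only [List.nil_append] at this ⊢
      rw [this]
      simp [pvGrab, h, pvBlocksLoop_cons, List.append_assoc]

-- ===== VERDICT (by name: the statement is the Claim_ definition above) =====
theorem split_into_blocks_spec : Claim_equal_split_into_blocks := by
  intro rows g _ _
  unfold Spec_split_into_blocks split_into_blocks split_into_blocks_alt
  by_cases hrows : rows = []
  · simp [hrows]
  · simp only [hrows, if_false]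
    have hlen : (PySem.List.sorted rows (fun r => pvY r) false).length = rows.length :=
      PySem.List.length_sorted ..
    cases hs : PySem.List.sorted rows (fun r => pvY r) false with
    | nil =>
      exfalso
      rw [hs] at hlen
      exact hrows (List.eq_nil_of_length_eq_zero hlen.symm)
    | cons r0 rest =>
      simp only [List.drop_succ_cons, List.drop_zero]
      have := pvFold_grab g rest r0 [] []
      simp only [List.nil_append] at this ⊢
      rw [this, pvBlocksLoop_cons]
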